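-- pv_equiv track=rewrite | github.com/alex-itico/PonLab | core/events/pon_event_olt.py | _distribute_grant_by_priority
-- ===== SOURCE A (Python) =====
-- from typing import Dict, List, Optional, Any, Tuple, TYPE_CHECKING
--
-- def _distribute_grant_by_priority(onu_report: Dict[str, int],
--                                 total_grant_bytes: int) -> Dict[str, int]:
--     """
--     Distribuir grant entre T-CONTs según prioridades
--
--     Args:
--         onu_report: Report de la ONU {tcont_id: bytes}
--         total_grant_bytes: Total de bytes a distribuir
--
--     Returns:
--         Grants por T-CONT {tcont_id: bytes}
--     """
--     # Orden de prioridad (highest primero)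
--     priority_order = ['highest', 'high', 'medium', 'low', 'lowest']
--     grants = {tcont: 0 for tcont in priority_order}
--
--     remaining_bytes = total_grant_bytes
--
--     # Asignar por prioridad
--     for tcont in priority_order:
--         if remaining_bytes <= 0:
--             break
--
--         demand = onu_report.get(tcont, 0)
--         if demand > 0:
--             granted = min(demand, remaining_bytes)
--             grants[tcont] = granted
--             remaining_bytes -= granted
--
--     return grants
-- ===== SOURCE B (Python) =====
-- def _distribute_grant_by_priority(onu_report, total_grant_bytes):
--     priority_order = ['highest', 'high', 'medium', 'low', 'lowest']
--     grants = {}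
--     cum = 0
--     for tcont in priority_order:
--         demand = onu_report.get(tcont, 0)
--         new_cum = cum + demand if demand > 0 else cum
--         grants[tcont] = min(new_cum, total_grant_bytes) - min(cum, total_grant_bytes)
--         cum = new_cum
--     return grants
-- ===== Notes on version B (the rewrite author's own statement) =====
-- stated objective: alternative
-- what changed: Replaces the remaining-bytes accumulator with early break by a single pass computing clamped prefix sums of positive demands: each grant is min(cum_i, total) - min(cum_{i-1}, total).
import Mathlib
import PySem

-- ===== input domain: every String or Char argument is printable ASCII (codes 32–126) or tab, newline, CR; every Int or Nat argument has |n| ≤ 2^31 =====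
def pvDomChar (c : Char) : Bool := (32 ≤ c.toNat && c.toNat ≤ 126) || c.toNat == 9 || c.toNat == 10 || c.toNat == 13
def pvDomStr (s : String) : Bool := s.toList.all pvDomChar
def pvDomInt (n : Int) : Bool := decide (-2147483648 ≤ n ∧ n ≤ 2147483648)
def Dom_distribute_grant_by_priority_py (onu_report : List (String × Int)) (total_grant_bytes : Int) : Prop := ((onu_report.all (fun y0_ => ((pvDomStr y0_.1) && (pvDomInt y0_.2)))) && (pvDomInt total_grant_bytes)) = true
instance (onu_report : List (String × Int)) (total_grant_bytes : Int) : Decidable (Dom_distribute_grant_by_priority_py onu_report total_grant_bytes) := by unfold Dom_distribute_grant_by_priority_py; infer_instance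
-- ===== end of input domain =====

-- B replaces A's remaining-bytes accumulator (with its early break) by clamped prefix sums of the
-- positive demands: grant_i = min(cum_i, total) - min(cum_{i-1}, total).  Objective: alternative decomposition.

-- ===== PORT A =====
def pvPriorityOrder : List String := ["highest", "high", "medium", "low", "lowest"]

-- the 'for tcont in priority_order' loop of A, with its 'break' and in-place dict update
def pvLoopA (report : PySem.Dict String Int) : List String → PySem.Dict String Int → Int → PySem.Dict String Int
  | [], grants, _ => grants
  | t :: ts, grants, remaining =>
    if remaining ≤ 0 then grants
    else
      let demand := report.getD t 0
      if demand > 0 then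
        let granted := min demand remaining
        pvLoopA report ts (grants.insert t granted) (remaining - granted)
      else
        pvLoopA report ts grants remaining

def distribute_grant_by_priority_py (onu_report : List (String × Int)) (total_grant_bytes : Int) : List (String × Int) :=
  let grants := pvPriorityOrder.foldl (fun d t => d.insert t (0 : Int)) PySem.Dict.empty
  (pvLoopA (PySem.Dict.mk onu_report) pvPriorityOrder grants total_grant_bytes).items

-- ===== PORT B =====
-- the 'for tcont in priority_order' loop of B: fresh keys appended in order, cum carried along
def pvLoopB (report : PySem.Dict String Int) (total : Int) : List String → Int → List (String × Int)
  | [], _ => []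
  | t :: ts, cum =>
    let demand := report.getD t 0
    let ncum := if demand > 0 then cum + demand else cum
    (t, min ncum total - min cum total) :: pvLoopB report total ts ncum

def distribute_grant_by_priority_py_alt (onu_report : List (String × Int)) (total_grant_bytes : Int) : List (String × Int) :=
  pvLoopB (PySem.Dict.mk onu_report) total_grant_bytes pvPriorityOrder 0

-- ===== PRECONDITION & SPEC =====
def Spec_distribute_grant_by_priority_py (onu_report : List (String × Int)) (total_grant_bytes : Int) (out : List (String × Int)) : Prop := out = distribute_grant_by_priority_py_alt onu_report total_grant_bytes
instance (onu_report : List (String × Int)) (total_grant_bytes : Int) (out : List (String × Int)) : Decidable (Spec_distribute_grant_by_priority_py onu_report total_grant_bytes out) := by unfold Spec_distribute_grant_by_priority_py; infer_instance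

-- ===== CLAIM (what is proved, stated in full; the proofs are below) =====
def Claim_equal_distribute_grant_by_priority_py : Prop := ∀ (onu_report : List (String × Int)) (total_grant_bytes : Int), Dom_distribute_grant_by_priority_py onu_report total_grant_bytes → Spec_distribute_grant_by_priority_py onu_report total_grant_bytes (distribute_grant_by_priority_py onu_report total_grant_bytes)

-- ===== LEMMAS AND PROOFS =====

-- once the cumulative positive demand has reached the total, B grants only zeros
lemma pvLoopB_saturated (report : PySem.Dict String Int) (total : Int) :
    ∀ (ks : List String) (cum : Int), total ≤ cum →
      pvLoopB report total ks cum = ks.map (fun k => (k, (0 : Int))) := by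
  intro ks
  induction ks with
  | nil => intro cum _; simp [pvLoopB]
  | cons t ts ih =>
    intro cum h
    simp only [pvLoopB, List.map]
    have h1 : min (if report.getD t 0 > 0 then cum + report.getD t 0 else cum) total = total := by
      split_ifs <;> omega
    have h2 : min cum total = total := by omega
    rw [h1, h2, sub_self, ih _ (by split_ifs <;> omega)]

-- main loop invariant: A's remaining is total minus the clamped cumulative positive demand,
-- and A's grants dict is the already-emitted prefix followed by the untouched zero entries
lemma pvLoop_invariant (report : PySem.Dict String Int) (total : Int) :
    ∀ (ks : List String) (pre : List (String × Int)) (grants : PySem.Dict String Int) (cum : Int),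
      0 ≤ cum →
      grants.items = pre ++ ks.map (fun k => (k, (0 : Int))) →
      (pre.map Prod.fst ++ ks).Nodup →
      (pvLoopA report ks grants (total - min cum total)).items
        = pre ++ pvLoopB report total ks cum := by
  intro ks
  induction ks with
  | nil => intro pre grants cum _ hitems _; simpa [pvLoopA, pvLoopB] using hitems
  | cons t ts ih =>
    intro pre grants cum hcum hitems hnd
    by_cases hbreak : total - min cum total ≤ 0
    · -- A breaks; cum has reached total, so B emits zeros from here on
      have htc : total ≤ cum := by omega
      rw [pvLoopA]
      simp only [hbreak, if_pos]
      rw [pvLoopB_saturated report total (t :: ts) cum htc]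
      exact hitems
    · -- remaining > 0, hence cum < total and remaining = total - cum
      have hct : cum < total := by omega
      have hmin : min cum total = cum := by omega
      rw [pvLoopA]
      simp only [hbreak, if_neg, not_false_iff]
      have hndt : t ∉ pre.map Prod.fst ∧ t ∉ ts := by
        have hnd' := hnd
        rw [List.nodup_append] at hnd'
        obtain ⟨_, h2, h3⟩ := hnd'
        exact ⟨fun hm => h3 t hm t (by simp) rfl, (List.nodup_cons.mp h2).1⟩
      by_cases hd : report.getD t 0 > 0
      · simp only [hd, if_pos]
        have hcont : grants.contains t = true := by
          rw [PySem.Dict.contains_eq_isSome_get?]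
          have : (t, (0:Int)) ∈ grants.items := by rw [hitems]; simp
          have hnodup : grants.keys.Nodup := by
            have : grants.keys = pre.map Prod.fst ++ (t :: ts) := by
              show grants.items.map Prod.fst = _
              rw [hitems]; simp [Function.comp_def]
            rw [this]; exact hnd
          rw [PySem.Dict.get?_of_mem_items grants this hnodup]; rfl
        have hbeq : ∀ p : String × Int, p ∈ pre → (p.1 == t) = false := by
          intro p hp
          have : p.1 ≠ t := fun h => hndt.1 (h ▸ (List.mem_map.mpr ⟨p, hp, rfl⟩))
          simpa using this
        have hitems' : (grants.insert t (min (report.getD t 0) (total - min cum total))).items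
            = (pre ++ [(t, min (report.getD t 0) (total - min cum total))]) ++ ts.map (fun k => (k, (0 : Int))) := by
          rw [PySem.Dict.items_insert_of_contains _ _ hcont, hitems]
          simp only [List.map_append, List.map_cons, List.map_map, List.append_assoc,
            List.singleton_append]
          congr 1
          · conv_rhs => rw [← List.map_id pre]
            apply List.map_congr_left
            intro p hp
            simp [hbeq p hp]
          · congr 1
            · simp
            · apply List.map_congr_left
              intro k hk
              have : (k == t) = false := by
                have : k ≠ t := fun h => hndt.2 (h ▸ hk)
                simpa using this
              simp [Function.comp, this]
        have hrem : total - min cum total - min (report.getD t 0) (total - min cum total)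
            = total - min (cum + report.getD t 0) total := by omega
        rw [hrem]
        rw [ih (pre ++ [(t, min (report.getD t 0) (total - min cum total))])
              _ (cum + report.getD t 0) (by omega) hitems'
              (by simpa using hnd)]
        rw [pvLoopB]
        simp only [hd, if_pos]
        have : min (report.getD t 0) (total - min cum total)
            = min (cum + report.getD t 0) total - min cum total := by omega
        rw [this]
        simp
      · simp only [hd, if_neg, not_false_iff]
        have hitems' : grants.items = (pre ++ [(t, (0 : Int))]) ++ ts.map (fun k => (k, (0 : Int))) := by
          rw [hitems]; simp
        have hrw : total - min cum total = total - min (cum) total := rfl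
        rw [ih (pre ++ [(t, (0 : Int))]) grants cum hcum hitems' (by simpa using hnd)]
        rw [pvLoopB]
        simp only [hd, if_neg, not_false_iff]
        simp

-- ===== VERDICT (by name: the statement is the Claim_ definition above) =====
theorem distribute_grant_by_priority_py_spec : Claim_equal_distribute_grant_by_priority_py := by
  intro onu_report total _
  unfold Spec_distribute_grant_by_priority_py
  unfold distribute_grant_by_priority_py distribute_grant_by_priority_py_alt
  set report := PySem.Dict.mk onu_report
  show (pvLoopA report pvPriorityOrder
      (pvPriorityOrder.foldl (fun d t => d.insert t (0 : Int)) PySem.Dict.empty) total).items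
    = pvLoopB report total pvPriorityOrder 0
  by_cases hT : total ≤ 0
  · -- A breaks immediately; B's clamps are all at total, so every grant is 0
    have hA : pvLoopA report pvPriorityOrder
        (pvPriorityOrder.foldl (fun d t => d.insert t (0 : Int)) PySem.Dict.empty) total
        = pvPriorityOrder.foldl (fun d t => d.insert t (0 : Int)) PySem.Dict.empty := by
      unfold pvPriorityOrder
      rw [pvLoopA]
      simp [hT]
    rw [hA, pvLoopB_saturated report total pvPriorityOrder 0 hT]
    decide
  · have h := pvLoop_invariant report total pvPriorityOrder []
          (pvPriorityOrder.foldl (fun d t => d.insert t (0 : Int)) PySem.Dict.empty) 0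
          le_rfl (by decide) (by decide)
    have hmin : total - min (0 : Int) total = total := by omega
    rw [hmin] at h
    simpa using h
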